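-- pv_equiv track=rewrite | github.com/michaeljclark/git | contrib/sha/create-empty-hashes.py | escape_hex
-- ===== SOURCE A (Python) =====
-- def escape_hex(hex):
-- 	s = ""
-- 	for i in range(len(hex)):
-- 		if i % 20 == 0 and i != 0:
-- 			s += '" \\\n	"'
-- 		if i % 2 == 0:
-- 			s += '\\x'
-- 		s += hex[i]
-- 	return s
-- ===== SOURCE B (Python) =====
-- def escape_hex(hex):
-- 	SEP = '" \\\n	"'
-- 	tokens = ['\\x' + hex[2 * j:2 * j + 2] for j in range((len(hex) + 1) // 2)]
-- 	groups = [tokens[10 * k:10 * k + 10] for k in range((len(tokens) + 9) // 10)]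
-- 	return SEP.join(''.join(g) for g in groups)
-- ===== Notes on version B (the rewrite author's own statement) =====
-- stated objective: alternative
-- what changed: Replaces the per-character index loop with a token/group decomposition: build one '\x..' token per byte (hex pair), chunk the tokens into lines of 10, and join the lines with the separator literal.
import Mathlib
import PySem

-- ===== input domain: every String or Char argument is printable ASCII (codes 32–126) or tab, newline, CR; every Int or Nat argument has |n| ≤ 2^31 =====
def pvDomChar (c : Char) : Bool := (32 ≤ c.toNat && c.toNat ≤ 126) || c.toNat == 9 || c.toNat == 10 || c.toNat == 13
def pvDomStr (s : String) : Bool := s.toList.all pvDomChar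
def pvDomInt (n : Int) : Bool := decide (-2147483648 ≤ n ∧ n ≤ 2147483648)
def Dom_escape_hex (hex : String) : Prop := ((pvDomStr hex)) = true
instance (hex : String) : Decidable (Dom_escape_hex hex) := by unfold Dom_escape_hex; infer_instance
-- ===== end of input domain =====

-- B re-decomposes the per-character index loop into byte tokens ('\x' + hex pair)
-- chunked into 10-token lines joined by the separator; same output, alternative structure.

-- the separator literal '" \\\n\t"' (6 characters)
def escSep : List Char := ['"', ' ', '\\', '\n', '\t', '"']

-- ===== PORT A =====
-- the for-loop of A: i is the loop index, s the accumulated string (as List Char)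
def escGo : Nat → List Char → List Char → List Char
  | _, [], s => s
  | i, c :: rest, s =>
    let s1 := if i % 20 = 0 ∧ i ≠ 0 then s ++ escSep else s
    let s2 := if i % 2 = 0 then s1 ++ ['\\', 'x'] else s1
    escGo (i + 1) rest (s2 ++ [c])

def escape_hex (hex : String) : String :=
  String.ofList (escGo 0 hex.toList [])

-- ===== PORT B =====
def escape_hex_alt (hex : String) : String :=
  let l := hex.toList
  -- tokens = ['\x' + hex[2*j:2*j+2] for j in range((len(hex)+1)//2)]
  let tokens : List (List Char) :=
    (List.range ((l.length + 1) / 2)).map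
      (fun j => '\\' :: 'x' :: PySem.List.slice l (some ((2 * j : Nat) : Int)) (some ((2 * j + 2 : Nat) : Int)))
  -- groups = [tokens[10*k:10*k+10] for k in range((len(tokens)+9)//10)]
  let groups : List (List (List Char)) :=
    (List.range ((tokens.length + 9) / 10)).map
      (fun k => PySem.List.slice tokens (some ((10 * k : Nat) : Int)) (some ((10 * k + 10 : Nat) : Int)))
  -- SEP.join(''.join(g) for g in groups)
  String.ofList (PySem.Chars.join escSep (groups.map (fun g => PySem.Chars.join [] g)))

-- ===== PRECONDITION & SPEC =====
def Spec_escape_hex (hex : String) (out : String) : Prop := out = escape_hex_alt hex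
instance (hex : String) (out : String) : Decidable (Spec_escape_hex hex out) := by unfold Spec_escape_hex; infer_instance

-- ===== CLAIM (what is proved, stated in full; the proofs are below) =====
def Claim_equal_escape_hex : Prop := ∀ (hex : String), Dom_escape_hex hex → Spec_escape_hex hex (escape_hex hex)

-- ===== LEMMAS AND PROOFS =====

-- A's loop without the accumulator, emitting from the front
def pA : Nat → List Char → List Char
  | _, [] => []
  | i, c :: rest =>
    (if i % 20 = 0 ∧ i ≠ 0 then escSep else []) ++
    (if i % 2 = 0 then ['\\', 'x'] else []) ++ [c] ++ pA (i + 1) rest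

-- recursive form of B's token list
def tB : List Char → List (List Char)
  | [] => []
  | [c] => [['\\', 'x', c]]
  | a :: b :: r => ['\\', 'x', a, b] :: tB r

-- recursive form of B's 10-token chunking
def cB : List (List Char) → List (List (List Char))
  | [] => []
  | t :: rest => ((t :: rest).take 10) :: cB ((t :: rest).drop 10)
  termination_by ts => ts.length
  decreasing_by simp

theorem cB_nil : cB [] = [] := by rw [cB.eq_def]

theorem cB_cons (t : List Char) (rest : List (List Char)) :
    cB (t :: rest) = ((t :: rest).take 10) :: cB ((t :: rest).drop 10) := by rw [cB.eq_def]

theorem escGo_eq_pA (l : List Char) : ∀ (i : Nat) (s : List Char), escGo i l s = s ++ pA i l := by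
  induction l with
  | nil => intro i s; simp [escGo, pA]
  | cons c rest ih =>
    intro i s
    simp only [escGo, pA, ih]
    split_ifs <;> simp

theorem pA_append (xs : List Char) : ∀ (ys : List Char) (i : Nat),
    pA i (xs ++ ys) = pA i xs ++ pA (i + xs.length) ys := by
  induction xs with
  | nil => intro ys i; simp [pA]
  | cons c rest ih =>
    intro ys i
    simp only [List.cons_append, pA, ih]
    simp [List.append_assoc]
    ring_nf

theorem pA_shift (r : List Char) : ∀ (i : Nat), 1 ≤ i → pA (i + 20) r = pA i r := by
  induction r with
  | nil => intro i _; simp [pA]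
  | cons c rest ih =>
    intro i hi
    have h20 : ((i + 20) % 20 = 0 ∧ i + 20 ≠ 0) ↔ (i % 20 = 0 ∧ i ≠ 0) := by omega
    have h2 : ((i + 20) % 2 = 0) ↔ (i % 2 = 0) := by omega
    simp only [pA]
    rw [if_congr h20 rfl rfl, if_congr h2 rfl rfl]
    have : i + 20 + 1 = (i + 1) + 20 := by omega
    rw [this, ih (i + 1) (by omega)]

theorem pA_small (l : List Char) : ∀ (i : Nat), 0 < i → i % 2 = 0 → i + l.length ≤ 20 →
    pA i l = (tB l).flatten := by
  induction l using tB.induct with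
  | case1 => intro i _ _ _; simp [pA, tB]
  | case2 c =>
    intro i hpos hev hle
    simp at hle
    have hc1 : ¬ (i % 20 = 0 ∧ i ≠ 0) := by omega
    simp [pA, tB, hc1, hev]
  | case3 a b r ih =>
    intro i hpos hev hle
    simp at hle
    have hc1 : ¬ (i % 20 = 0 ∧ i ≠ 0) := by omega
    have hc3 : ¬ ((i + 1) % 2 = 0) := by omega
    have hc2' : ¬ ((i + 1) % 20 = 0) := by omega
    simp [pA, tB, hc1, hc3, hc2', hev]
    rw [ih (i + 2) (by omega) (by omega) (by omega)]

theorem pA_zero_small (l : List Char) (hle : l.length ≤ 20) : pA 0 l = (tB l).flatten := by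
  match l with
  | [] => simp [pA, tB]
  | [c] => simp [pA, tB]
  | a :: b :: r =>
    simp at hle
    simp [pA, tB]
    rw [pA_small r 2 (by omega) (by omega) (by omega)]

theorem pA_sep (r : List Char) (h : r ≠ []) : pA 20 r = escSep ++ pA 0 r := by
  match r with
  | c :: rest =>
    simp [pA]
    simpa using pA_shift rest 1 (by omega)

theorem tB_append (xs : List Char) : ∀ (ys : List Char), xs.length % 2 = 0 →
    tB (xs ++ ys) = tB xs ++ tB ys := by
  induction xs using tB.induct with
  | case1 => intro ys _; simp [tB]
  | case2 c => intro ys h; simp at h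
  | case3 a b r ih =>
    intro ys h
    simp only [List.cons_append, tB]
    rw [ih ys (by simp at h; omega)]

theorem tB_length (l : List Char) : (tB l).length = (l.length + 1) / 2 := by
  induction l using tB.induct with
  | case1 => simp [tB]
  | case2 c => simp [tB]
  | case3 a b r ih => simp [tB, ih]; omega

theorem tB_ne_nil (l : List Char) (h : l ≠ []) : tB l ≠ [] := by
  match l with
  | [c] => simp [tB]
  | a :: b :: r => simp [tB]

theorem cB_cons10 (a b : List (List Char)) (ha : a.length = 10) : cB (a ++ b) = a :: cB b := by
  match a with
  | t :: rest =>
    rw [show (t :: rest) ++ b = t :: (rest ++ b) from rfl, cB_cons]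
    have h1 : (t :: (rest ++ b)).take 10 = t :: rest := by
      have : (10:Nat) = (t :: rest).length := by omega
      rw [show t :: (rest ++ b) = (t :: rest) ++ b from rfl, this, List.take_left]
    have h2 : (t :: (rest ++ b)).drop 10 = b := by
      have : (10:Nat) = (t :: rest).length := by omega
      rw [show t :: (rest ++ b) = (t :: rest) ++ b from rfl, this, List.drop_left]
    rw [h1, h2]

theorem join_nil_flatten (ts : List (List Char)) : PySem.Chars.join [] ts = ts.flatten := by
  induction ts with
  | nil => simp [PySem.Chars.join_nil]
  | cons t rest ih =>
    cases rest with
    | nil => simp [PySem.Chars.join_singleton]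
    | cons u r => rw [PySem.Chars.join_cons_cons]; simp [ih]

-- B's tokens comprehension equals the recursive token list
theorem tokens_eq (l : List Char) :
    (List.range ((l.length + 1) / 2)).map
      (fun j => '\\' :: 'x' :: PySem.List.slice l (some ((2 * j : Nat) : Int)) (some ((2 * j + 2 : Nat) : Int)))
    = tB l := by
  induction l using tB.induct with
  | case1 => simp [tB]
  | case2 c =>
    rw [show (([c] : List Char).length + 1) / 2 = 1 by simp, List.range_one,
      List.map_singleton, PySem.List.slice_natCast]
    norm_num [tB]
  | case3 a b r ih =>
    have hn : ((a :: b :: r).length + 1) / 2 = (r.length + 1) / 2 + 1 := by simp; omega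
    rw [hn, List.range_succ_eq_map, List.map_cons, List.map_map, tB, ← ih]
    congr 1
    apply List.map_congr_left
    intro j _
    show '\\' :: 'x' :: PySem.List.slice (a :: b :: r)
        (some ((2 * (j + 1) : Nat) : Int)) (some ((2 * (j + 1) + 2 : Nat) : Int))
      = '\\' :: 'x' :: PySem.List.slice r (some ((2 * j : Nat) : Int)) (some ((2 * j + 2 : Nat) : Int))
    rw [PySem.List.slice_natCast, PySem.List.slice_natCast]
    have h1 : 2 * (j + 1) + 2 - 2 * (j + 1) = 2 := by omega
    have h2 : 2 * j + 2 - 2 * j = 2 := by omega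
    have h3 : (a :: b :: r).drop (2 * (j + 1)) = r.drop (2 * j) := by
      rw [show 2 * (j + 1) = 2 * j + 1 + 1 by omega]
      simp [List.drop_succ_cons]
    rw [h1, h2, h3]

-- B's groups comprehension equals the recursive chunking
theorem groups_eq (n : Nat) : ∀ (ts : List (List Char)), ts.length ≤ n →
    (List.range ((ts.length + 9) / 10)).map
      (fun k => PySem.List.slice ts (some ((10 * k : Nat) : Int)) (some ((10 * k + 10 : Nat) : Int)))
    = cB ts := by
  induction n with
  | zero =>
    intro ts h
    have : ts = [] := List.eq_nil_of_length_eq_zero (by omega)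
    subst this; simp [cB_nil]
  | succ n ih =>
    intro ts h
    match ts with
    | [] => simp [cB_nil]
    | t :: rest =>
      have hlen : ((t :: rest).length + 9) / 10 = (((t :: rest).drop 10).length + 9) / 10 + 1 := by
        simp; omega
      rw [hlen, List.range_succ_eq_map, List.map_cons, List.map_map, cB_cons,
        ← ih ((t :: rest).drop 10) (by simp at h ⊢; omega)]
      congr 1
      · show PySem.List.slice (t :: rest)
            (some ((10 * 0 : Nat) : Int)) (some ((10 * 0 + 10 : Nat) : Int)) = (t :: rest).take 10
        rw [PySem.List.slice_natCast]
        norm_num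
      · apply List.map_congr_left
        intro k _
        show PySem.List.slice (t :: rest)
              (some ((10 * (k + 1) : Nat) : Int)) (some ((10 * (k + 1) + 10 : Nat) : Int))
            = PySem.List.slice ((t :: rest).drop 10)
              (some ((10 * k : Nat) : Int)) (some ((10 * k + 10 : Nat) : Int))
        rw [PySem.List.slice_natCast, PySem.List.slice_natCast]
        have h1 : 10 * (k + 1) + 10 - 10 * (k + 1) = 10 := by omega
        have h2 : 10 * k + 10 - 10 * k = 10 := by omega
        have h3 : (t :: rest).drop (10 * (k + 1)) = ((t :: rest).drop 10).drop (10 * k) := by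
          rw [List.drop_drop]
          congr 1
          omega
        rw [h1, h2, h3]

-- the heart of the equivalence: A's loop output = join of B's chunked tokens
theorem main_eq (n : Nat) : ∀ (l : List Char), l.length ≤ n →
    pA 0 l = PySem.Chars.join escSep ((cB (tB l)).map (fun g => PySem.Chars.join [] g)) := by
  induction n using Nat.strong_induction_on with
  | _ n ih =>
    intro l hn
    by_cases hle : l.length ≤ 20
    · -- short input: a single group, no separator
      match l with
      | [] => simp [pA, tB, cB, PySem.Chars.join_nil]
      | c :: ls =>
        have htb : tB (c :: ls) ≠ [] := tB_ne_nil _ (by simp)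
        have hlen : (tB (c :: ls)).length ≤ 10 := by rw [tB_length]; simp at hle ⊢; omega
        have hcb : cB (tB (c :: ls)) = [tB (c :: ls)] := by
          match htb' : tB (c :: ls), htb with
          | t :: rest, _ =>
            rw [cB_cons]
            have : (t :: rest).length ≤ 10 := by rw [← htb']; exact hlen
            rw [List.take_of_length_le this, List.drop_eq_nil_of_le (by omega), cB_nil]
        rw [hcb, List.map_cons, List.map_nil, PySem.Chars.join_singleton,
          join_nil_flatten, pA_zero_small _ hle]
    · -- long input: split off the first 20 characters (= 10 tokens = one group)
      rw [not_le] at hle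
      set xs := l.take 20 with hxs
      set ys := l.drop 20 with hys
      have hxlen : xs.length = 20 := by simp [hxs]; omega
      have hylen : ys.length = l.length - 20 := by simp [hys]
      have hyne : ys ≠ [] := by
        intro hy; rw [hy] at hylen; simp at hylen; omega
      have hl : l = xs ++ ys := (List.take_append_drop 20 l).symm
      -- A side
      have hA : pA 0 l = (tB xs).flatten ++ escSep ++ pA 0 ys := by
        rw [hl, pA_append, pA_zero_small xs (by omega)]
        rw [show 0 + xs.length = 20 by omega, pA_sep ys hyne, List.append_assoc]
      -- B side
      have htbl : tB l = tB xs ++ tB ys := by rw [hl, tB_append xs ys (by omega)]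
      have htbx : (tB xs).length = 10 := by rw [tB_length, hxlen]
      have hcb : cB (tB l) = tB xs :: cB (tB ys) := by rw [htbl, cB_cons10 _ _ htbx]
      have htbyne : tB ys ≠ [] := tB_ne_nil ys hyne
      have hcbne : cB (tB ys) ≠ [] := by
        match hm : tB ys, htbyne with
        | t :: rest, _ => rw [cB_cons]; simp
      rw [hcb, List.map_cons]
      match hcy : (cB (tB ys)).map (fun g => PySem.Chars.join [] g) with
      | [] => exact absurd (List.map_eq_nil_iff.mp hcy) hcbne
      | q :: qs =>
        rw [PySem.Chars.join_cons_cons, join_nil_flatten, hA]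
        have hys' : pA 0 ys = PySem.Chars.join escSep (q :: qs) := by
          rw [← hcy]
          exact ih (n - 1) (by omega) ys (by omega)
        rw [hys']

-- ===== VERDICT (by name: the statement is the Claim_ definition above) =====
theorem escape_hex_spec : Claim_equal_escape_hex := by
  intro hex _
  unfold Spec_escape_hex escape_hex escape_hex_alt
  simp only [tokens_eq]
  rw [groups_eq (tB hex.toList).length _ (le_refl _),
    escGo_eq_pA, List.nil_append,
    main_eq hex.toList.length hex.toList (le_refl _)]
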